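-- pv_equiv track=rewrite | github.com/cameronehring-lab/Ghost--7 | backend/local_llm_client.py | _ollama_model_candidates
-- ===== SOURCE A (Python) =====
-- _OLLAMA_MODEL_ALIASES: dict[str, tuple[str, ...]] = {
--     "llama3.1:8b-instruct": ("llama3.1:8b",),
--     "llama3.1:70b-instruct": ("llama3.1:70b",),
--     "llama3.2:3b-instruct": ("llama3.2:3b",),
--     "llama3.2:1b-instruct": ("llama3.2:1b",),
-- }
--
-- def _ollama_model_candidates(model_name: str) -> list[str]:
--     base = str(model_name or "").strip()
--     if not base:
--         return []
--     candidates: list[str] = [base]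
--     for alias in _OLLAMA_MODEL_ALIASES.get(base, ()):
--         if alias not in candidates:
--             candidates.append(alias)
--     if base.endswith("-instruct"):
--         stripped = base[: -len("-instruct")]
--         if stripped and stripped not in candidates:
--             candidates.append(stripped)
--     return candidates
-- ===== SOURCE B (Python) =====
-- _OLLAMA_MODEL_ALIASES: dict[str, tuple[str, ...]] = {
--     "llama3.1:8b-instruct": ("llama3.1:8b",),
--     "llama3.1:70b-instruct": ("llama3.1:70b",),
--     "llama3.2:3b-instruct": ("llama3.2:3b",),
--     "llama3.2:1b-instruct": ("llama3.2:1b",),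
-- }
--
--
-- def _expand(key: str, aliases: tuple[str, ...]) -> list[str]:
--     out = [key]
--     for c in (*aliases, key[: -len("-instruct")] if key.endswith("-instruct") else ""):
--         if c and c not in out:
--             out.append(c)
--     return out
--
--
-- # Full candidate lists precomputed once at import time, keyed by model name.
-- _OLLAMA_CANDIDATES: dict[str, list[str]] = {
--     k: _expand(k, v) for k, v in _OLLAMA_MODEL_ALIASES.items()
-- }
--
--
-- def _ollama_model_candidates(model_name: str) -> list[str]:
--     base = str(model_name or "").strip()
--     if not base:
--         return []
--     hit = _OLLAMA_CANDIDATES.get(base)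
--     if hit is not None:
--         return list(hit)
--     stripped = base[: -len("-instruct")] if base.endswith("-instruct") else ""
--     return [base, stripped] if stripped else [base]
-- ===== Notes on version B (the rewrite author's own statement) =====
-- stated objective: alternative
-- what changed: B precomputes the full candidate list for every aliased model once at import time into a lookup table, so each call is just a dict lookup plus a suffix branch for unknown names, instead of A's per-call alias loop with append-if-not-present checks.
import Mathlib
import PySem

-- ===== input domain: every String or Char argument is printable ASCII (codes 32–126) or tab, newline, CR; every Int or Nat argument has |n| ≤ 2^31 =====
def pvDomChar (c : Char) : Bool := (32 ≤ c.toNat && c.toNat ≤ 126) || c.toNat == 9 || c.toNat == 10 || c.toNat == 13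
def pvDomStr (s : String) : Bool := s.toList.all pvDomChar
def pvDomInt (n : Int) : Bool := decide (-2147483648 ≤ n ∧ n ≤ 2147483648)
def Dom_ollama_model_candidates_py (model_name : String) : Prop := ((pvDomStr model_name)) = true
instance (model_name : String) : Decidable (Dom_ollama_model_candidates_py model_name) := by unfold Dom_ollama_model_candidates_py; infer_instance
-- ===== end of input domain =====

-- B replaces A's per-call alias loop with a candidate table precomputed once at import
-- (per-call work is one dict lookup plus a suffix branch; objective: alternative).


-- shared data table (the module-level _OLLAMA_MODEL_ALIASES constant)
def pvOllamaAliases : PySem.Dict String (List String) :=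
  PySem.Dict.ofList
    [ ("llama3.1:8b-instruct", ["llama3.1:8b"])
    , ("llama3.1:70b-instruct", ["llama3.1:70b"])
    , ("llama3.2:3b-instruct", ["llama3.2:3b"])
    , ("llama3.2:1b-instruct", ["llama3.2:1b"]) ]

-- ===== PORT A =====
def ollama_model_candidates_py (model_name : String) : List String :=
  let base := PySem.Str.strip model_name
  if base = "" then []
  else
    let candidates : List String := [base]
    let candidates := (pvOllamaAliases.getD base []).foldl
      (fun c a => if c.contains a then c else c ++ [a]) candidates
    if PySem.Str.endswith base "-instruct" then
      let stripped := PySem.Str.slice base none (some (-9))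
      if stripped ≠ "" ∧ ¬ candidates.contains stripped then candidates ++ [stripped]
      else candidates
    else candidates

-- ===== PORT B =====
-- _expand: the import-time helper that builds one full candidate row
def pvExpand (key : String) (aliases : List String) : List String :=
  (aliases ++ [if PySem.Str.endswith key "-instruct"
               then PySem.Str.slice key none (some (-9)) else ""]).foldl
    (fun out c => if c ≠ "" ∧ ¬ out.contains c then out ++ [c] else out) [key]

-- _OLLAMA_CANDIDATES: full candidate lists precomputed once, keyed by model name
def pvOllamaCandidates : PySem.Dict String (List String) :=
  PySem.Dict.ofList (pvOllamaAliases.items.map (fun kv => (kv.1, pvExpand kv.1 kv.2)))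

def ollama_model_candidates_py_alt (model_name : String) : List String :=
  let base := PySem.Str.strip model_name
  if base = "" then []
  else
    match pvOllamaCandidates.get? base with
    | some hit => hit
    | none =>
      let stripped := if PySem.Str.endswith base "-instruct"
                      then PySem.Str.slice base none (some (-9)) else ""
      if stripped ≠ "" then [base, stripped] else [base]

-- ===== PRECONDITION & SPEC =====
def Spec_ollama_model_candidates_py (model_name : String) (out : List String) : Prop := out = ollama_model_candidates_py_alt model_name
instance (model_name : String) (out : List String) : Decidable (Spec_ollama_model_candidates_py model_name out) := by unfold Spec_ollama_model_candidates_py; infer_instance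

-- ===== CLAIM (what is proved, stated in full; the proofs are below) =====
def Claim_equal_ollama_model_candidates_py : Prop := ∀ (model_name : String), Dom_ollama_model_candidates_py model_name → Spec_ollama_model_candidates_py model_name (ollama_model_candidates_py model_name)

-- ===== LEMMAS AND PROOFS =====

-- stripping "-instruct" shortens the string, so the stripped name never equals the base
lemma pv_stripped_ne (base : String)
    (he : PySem.Str.endswith base "-instruct" = true) :
    PySem.Str.slice base none (some (-9)) ≠ base := by
  intro h
  have hs : "-instruct".toList <:+ base.toList := by
    rw [← PySem.Chars.endswith_iff]
    simpa using he
  have hlen : 9 ≤ base.toList.length := by simpa using hs.length_le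
  have hsl : (PySem.Str.slice base none (some (-9))).toList
      = base.toList.take (base.toList.length - 9) := by
    simp [PySem.Str.toList_slice]
    rw [PySem.List.slice_to_neg_ofNat _ 9 (by omega)]
    rw [String.length_toList]
  rw [h] at hsl
  have hl := congrArg List.length hsl
  rw [List.length_take] at hl
  omega

-- the two module dicts, reduced to literal item lists (used by the key-miss case)
lemma pv_aliases_mk : pvOllamaAliases = PySem.Dict.mk
    [ ("llama3.1:8b-instruct", ["llama3.1:8b"])
    , ("llama3.1:70b-instruct", ["llama3.1:70b"])
    , ("llama3.2:3b-instruct", ["llama3.2:3b"])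
    , ("llama3.2:1b-instruct", ["llama3.2:1b"]) ] := by decide

lemma pv_candidates_mk : pvOllamaCandidates = PySem.Dict.mk
    [ ("llama3.1:8b-instruct", ["llama3.1:8b-instruct", "llama3.1:8b"])
    , ("llama3.1:70b-instruct", ["llama3.1:70b-instruct", "llama3.1:70b"])
    , ("llama3.2:3b-instruct", ["llama3.2:3b-instruct", "llama3.2:3b"])
    , ("llama3.2:1b-instruct", ["llama3.2:1b-instruct", "llama3.2:1b"]) ] := by decide

theorem ollama_model_candidates_py_spec : Claim_equal_ollama_model_candidates_py := by
  intro m _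
  unfold Spec_ollama_model_candidates_py ollama_model_candidates_py ollama_model_candidates_py_alt
  by_cases h0 : PySem.Str.strip m = ""
  · simp [h0]
  · simp only [h0, if_false]
    set base := PySem.Str.strip m with hb
    clear_value base
    by_cases k1 : base = "llama3.1:8b-instruct"
    · subst k1; decide
    by_cases k2 : base = "llama3.1:70b-instruct"
    · subst k2; decide
    by_cases k3 : base = "llama3.2:3b-instruct"
    · subst k3; decide
    by_cases k4 : base = "llama3.2:1b-instruct"
    · subst k4; decide
    · -- base is not a table key
      have hA : pvOllamaAliases.getD base [] = [] := by
        rw [pv_aliases_mk]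
        simp [PySem.Dict.getD, PySem.Dict.get?, Ne.symm k1, Ne.symm k2, Ne.symm k3, Ne.symm k4]
      have hB : pvOllamaCandidates.get? base = none := by
        rw [pv_candidates_mk]
        simp [PySem.Dict.get?, Ne.symm k1, Ne.symm k2, Ne.symm k3, Ne.symm k4]
      rw [hA, hB]
      simp only [List.foldl_nil]
      by_cases he : PySem.Str.endswith base "-instruct" = true
      · simp only [he, if_true]
        by_cases hne : PySem.Str.slice base none (some (-9)) = ""
        · simp [hne]
        · have hnb := pv_stripped_ne base he
          simp [hne, hnb]
      · simp only [Bool.not_eq_true] at he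
        have he' : PySem.Chars.endswith base.toList
            ['-', 'i', 'n', 's', 't', 'r', 'u', 'c', 't'] = false := by
          simpa using he
        simp [he']
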